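/- GENERATED by mk_final_copies.py from the proof of the farm's unit `start_decoder.F6d` (farm:start_decoder.F6d.1: Lemmas.lean) as the
   re-elaboration sweep compiled it — do not edit. -/
/-
  HEAD START for unit `start_decoder.F6d` (copied from farm/hints/start_decoder.F6b.head-start.lean) (the Lemmas.lean of the first worker of `start_decoder.F6`, farm attempt start_decoder.F6.1,
  in the unit's namespace; three helper names changed: `f6_obj_where`, `f6_sext_ofNat`, `f6_inc32_ofNat`). Useful for F6c and F6d too.
  * THE WORKER'S OWN FRAME MACHINERY (`MemPart`, `OkSpan`, `MemPart.carry_ws`, `St`, `St.step`, `St.step_eqs`): it does what the floor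
    layer's `Floor.carry_quiet` + `Floor.floor6_carry` do (Vorbis/Spec/StartDecoderFloor.lean); `St u₀ g pc i A5 A mc n v` IS the tree's
    `InF6 u₀ g i A5 A mc n pc v` (Vorbis/Spec/StartDecoderF6.lean): `St.of_inF6`, `St.inF6` at the end of this file go both ways.
  * `walk_loop1_body` = ONE ROUND OF LOOP 4015, PROVED (21 s): the arm `j < values` of the `jg` 0x11577d, all four check sites, back at
    the head with `Inv1` (= `AtF6P`'s clauses for `j + 1`) and the measure `250 − r12`. `walk_entry` = the unit F6a.
  * LEFT for F6b: the arm `values ≤ j` (0x11577f–0x115799): `qsort`'s precondition, `CmpSpec.of_calls` from `point_compare.spec`,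
    `RecordsKept.preserved` → `PID.of_records`, `j = 0` from Z24: the exit `AtF6Q`. See farm/hints/start_decoder.F6.md.
-/
import Asan.CheckWalk
import Vorbis.Spec.LibcSortBridge
import Vorbis.Spec.Units.start_decoder_F6d

open X86 X86.User Asan Vorbis Vorbis.Spec Vorbis.Spec.StartDecoder

set_option maxRecDepth 4000
set_option maxHeartbeats 4000000

namespace Vorbis.Spec.start_decoder_F6d

/-- The floor element under construction has the same address in two memories whose `floor_config` field agrees. -/
theorem floorAt_eq {g : Ghost} {mem mem' : Mem} (i : Nat)
    (hcfg : stb_vorbis.floor_config mem' g.f = stb_vorbis.floor_config mem g.f) : floorAt g mem' i = floorAt g mem i := by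
  simp only [floorAt, stb_vorbis.floor_config_at]
  rw [hcfg]

/-- The class transient of `Floor6` cut at 16 classes (`max_class ≤ 15`): the counter `n` of the class loop at its exit is a
ghost of the assertion with no upper bound; only the classes `≤ max_class` are ever used. -/
theorem floor6_cut {g : Ghost} {mem : Mem} {i : Nat} {mc : Int} {n : Nat} (h : Floor6 g mem i mc n) :
    Floor6 g mem i mc (min n 16) := by
  obtain ⟨⟨hb, hcls, hmcn⟩, h7, h8, hxl⟩ := h
  have hmc := hb.mc_hi
  refine ⟨⟨hb, ?_, ?_⟩, h7, h8, hxl⟩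
  · intro c hc
    exact hcls c (by omega)
  · omega

/-- **`Floor6` (FL3 – FL8, XL of the element under construction) over a change of memory that keeps the header fields of `*f`
and every byte of the element except `sorted_order[250]`** (`[g + 838, g + 1088)`): the stores of loop 4023, and — a fortiori —
every store outside the element. -/
theorem floor6_frame {g : Ghost} {mem mem' : Mem} {i : Nat} {mc : Int} {n : Nat} (h : Floor6 g mem i mc n)
    (hfc : stb_vorbis.floor_count mem' g.f = stb_vorbis.floor_count mem g.f)
    (hcfg : stb_vorbis.floor_config mem' g.f = stb_vorbis.floor_config mem g.f)
    (hcc : stb_vorbis.codebook_count mem' g.f = stb_vorbis.codebook_count mem g.f)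
    (hft : stb_vorbis.floor_types mem' g.f i = stb_vorbis.floor_types mem g.f i)
    (hlo : Mem.EqOn (floorAt g mem i) (floorAt g mem i + 838) mem mem')
    (hhi : Mem.EqOn (floorAt g mem i + 1088) (floorAt g mem i + 1596) mem mem')
    (hg : floorAt g mem i + 1596 ≤ 2 ^ 64) (hn : n ≤ 16) : Floor6 g mem' i mc n := by
  have eg := floorAt_eq (g := g) i hcfg
  obtain ⟨⟨⟨hlt, h3, h4, hmc1, hmc2, hpcl⟩, hcls, hmcn⟩, h7, h8, hxl⟩ := h
  generalize floorAt g mem i = gi at *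
  have e_part : Floor1.partitions mem' gi = Floor1.partitions mem gi := by
    simp only [vacc, voff]
    exact hlo.u8 _ (by omega) (by omega) (by omega)
  have e_pcl : ∀ j : Nat, j < 32 → Floor1.partition_class_list mem' gi j = Floor1.partition_class_list mem gi j := by
    intro j hj
    simp only [vacc, voff]
    exact hlo.u8 _ (by omega) (by omega) (by omega)
  have e_dim : ∀ c : Nat, c < 16 → Floor1.class_dimensions mem' gi c = Floor1.class_dimensions mem gi c := by
    intro c hc
    simp only [vacc, voff]
    exact hlo.u8 _ (by omega) (by omega) (by omega)
  have e_sub : ∀ c : Nat, c < 16 → Floor1.class_subclasses mem' gi c = Floor1.class_subclasses mem gi c := by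
    intro c hc
    simp only [vacc, voff]
    exact hlo.u8 _ (by omega) (by omega) (by omega)
  have e_mas : ∀ c : Nat, c < 16 → Floor1.class_masterbooks mem' gi c = Floor1.class_masterbooks mem gi c := by
    intro c hc
    simp only [vacc, voff]
    exact hlo.u8 _ (by omega) (by omega) (by omega)
  have e_bk : ∀ c k : Nat, c < 16 → k < 8 → Floor1.subclass_books mem' gi c k = Floor1.subclass_books mem gi c k := by
    intro c k hc hk
    simp only [vacc, voff]
    exact hlo.i16 _ (by omega) (by omega) (by omega)
  have e_x : ∀ j : Nat, j < 250 → Floor1.Xlist mem' gi j = Floor1.Xlist mem gi j := by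
    intro j hj
    simp only [vacc, voff]
    exact hlo.u16 _ (by omega) (by omega) (by omega)
  have e_mul : Floor1.floor1_multiplier mem' gi = Floor1.floor1_multiplier mem gi := by
    simp only [vacc, voff]
    exact hhi.u8 _ (by omega) (by omega) (by omega)
  have e_rb : Floor1.rangebits mem' gi = Floor1.rangebits mem gi := by
    simp only [vacc, voff]
    exact hhi.u8 _ (by omega) (by omega) (by omega)
  have e_val : Floor1.values mem' gi = Floor1.values mem gi := by
    simp only [vacc, voff]
    exact hhi.i32 _ (by omega) (by omega) (by omega)
  -- the bounds the index conditions need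
  have hp31 : Floor1.partitions mem gi ≤ 31 := h4
  have hpclb : ∀ j : Nat, j < Floor1.partitions mem gi → Floor1.partition_class_list mem gi j ≤ 15 :=
    fun j hj => (hpcl j hj).1
  have e_sum : Floor1.dimSum mem' gi (Floor1.partitions mem gi) = Floor1.dimSum mem gi (Floor1.partitions mem gi) := by
    apply Floor1.dimSum_congr
    · intro j hj
      exact e_pcl j (by omega)
    · intro j hj
      have := hpclb j hj
      exact e_dim _ (by omega)
  have hvals : 2 ≤ Floor1.values mem gi ∧ Floor1.values mem gi ≤ 250 := by
    have hs := sumTo_le_mul (fun j => Floor1.class_dimensions mem gi (Floor1.partition_class_list mem gi j)) 8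
      (Floor1.partitions mem gi) (by
        intro j hj
        have hc := hpclb j hj
        have hmcj := (hpcl j hj).2
        exact (hcls _ (by omega)).dim.2)
    unfold Floor1.dimSum at h8
    omega
  refine ⟨⟨⟨?_, ?_, ?_, hmc1, hmc2, ?_⟩, ?_, hmcn⟩, ?_, ?_, ?_⟩
  all_goals try rw [eg]
  · rw [hfc]
    exact hlt
  · rw [hft]
    exact h3
  · rw [e_part]
    exact h4
  · rw [e_part]
    exact hpcl.of_eq (fun j hj => e_pcl j (by omega))
  · rw [hcc]
    intro c hc
    have hc16 : c < 16 := by omega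
    exact (hcls c hc).of_eq (e_dim c hc16) (e_sub c hc16) (e_mas c hc16) (fun k hk => e_bk c k hc16 hk)
  · rw [e_mul]
    exact h7
  · rw [e_val, e_part, e_sum]
    exact h8
  · unfold XL at hxl ⊢
    rw [e_val]
    have h2 : 2 ≤ (Floor1.values mem gi).toNat := by omega
    exact hxl.of_eq h2 e_rb (fun j hj => e_x j (by omega))

/-- **The memory-dependent part of the assertions `BodyF6` / `BodyF7`** (and of the three loop heads in between): the frame's
slots and shadow layer, the point `Mid g 5 5 6`, the floor loop's invariant, `Floor6` of the element under construction. -/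
structure MemPart (g : Ghost) (i : Nat) (A5 : Arena) (A : Arena × List Obj) (mc : Int) (n : Nat) (mem : Mem) : Prop where
  shadowIdx : mem.u64 (g.R + 8) = (g.R + 0x50) / 8
  saved_rbx : mem.u64 (g.R + 0x598) = (g.e.reg .rbx).toNat
  saved_rbp : mem.u64 (g.R + 0x5a0) = (g.e.reg .rbp).toNat
  saved_r12 : mem.u64 (g.R + 0x5a8) = (g.e.reg .r12).toNat
  saved_r13 : mem.u64 (g.R + 0x5b0) = (g.e.reg .r13).toNat
  saved_r14 : mem.u64 (g.R + 0x5b8) = (g.e.reg .r14).toNat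
  saved_r15 : mem.u64 (g.R + 0x5c0) = (g.e.reg .r15).toNat
  saved_ra : mem.u64 (g.R + 0x5c8) = g.ret.toNat
  shadow : ShadowInv A.2 g.frames' g.R mem
  sh7 : Log2_4In mem
  mid : Mid g 5 5 6 A5 A mem
  cnt : StartDecoder.slot g mem 0x18 = i
  i_le : (i : Int) ≤ stb_vorbis.floor_count mem g.f
  floors : FloorsUpTo (Since A5 A.1) mem g.f i
  lfl : LflUpTo g mem i
  cur : Floor6 g mem i mc n

/-- **Where `*f` is**: a stack object of the CALLERS' frames (above the return-address slot), or off the stack region. -/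
theorem f6_obj_where {g : Ghost} {A : Arena × List Obj} {mem : Mem} (hh : g.Hand A) (hsh : ShadowInv A.2 g.frames' g.R mem)
    (hc : ∀ bF, bF ∈ g.frames → g.RA + 8 ≤ bF.1) :
    g.RA + 8 ≤ g.f ∨ g.f + Off.sizeof.stb_vorbis ≤ 0x700000 ∨ 0x800000 ≤ g.f := by
  obtain ⟨o, ho, k1, k2⟩ := hh.obj
  rcases List.mem_append.mp ho with hs | hoth
  · unfold stackObjs at hs
    obtain ⟨bF, hbF, hin⟩ := List.mem_flatMap.mp hs
    have hbF' : bF ∈ g.frames' := List.mem_cons_of_mem _ hbF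
    obtain ⟨a1, a8, atop, _, _⟩ := hsh.stack.active bF hbF'
    have hg := FrameLayout.objsAt_gran a1 a8 hin
    have hcb := hc bF hbF
    have : o.gLo = o.base / 8 := rfl
    left
    omega
  · have := hsh.off o hoth
    unfold OffStack at this
    omega

/-- **THE CARRY LEMMA**: `MemPart` over a change of memory that keeps `*f`, the blocks of the configuration arena `A5`, the floor
elements below `i`, the element `g(i)` outside `sorted_order`, the spill slots `[R + 8, R + 50H)`, the saved registers
`[R + 598H, R + 5D0H)`, the global `log2_4` and the shadow. -/
theorem MemPart.carry {g : Ghost} {i : Nat} {A5 : Arena} {A : Arena × List Obj} {mc : Int} {n : Nat} {mem mem' : Mem}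
    (h : MemPart g i A5 A mc n mem) (hn : n ≤ 16) (hR : g.R + 0x5d0 ≤ 2 ^ 64) (hf : g.f + Off.sizeof.stb_vorbis ≤ 2 ^ 64)
    (hobj : Mem.EqOn g.f (g.f + 1808) mem mem')
    (hk5 : ∀ B, A5.Blk B → B.Kept mem mem')
    (hkfl : ∀ i' : Nat, i' < i → (Block.mk (stb_vorbis.floor_config_at mem g.f i') Off.sizeof.Floor).Kept mem mem')
    (hlo : Mem.EqOn (floorAt g mem i) (floorAt g mem i + 838) mem mem')
    (hhi : Mem.EqOn (floorAt g mem i + 1088) (floorAt g mem i + 1596) mem mem')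
    (hg : floorAt g mem i + 1596 ≤ 2 ^ 64)
    (hslots : Mem.EqOn (g.R + 8) (g.R + 0x50) mem mem')
    (hsaved : Mem.EqOn (g.R + 0x598) (g.R + 0x5d0) mem mem')
    (hlog : Mem.EqOn 0x120640 0x120650 mem mem')
    (hsh : ShadowUntouched mem mem') : MemPart g i A5 A mc n mem' := by
  simp only [voff] at hf
  have hfc : stb_vorbis.floor_count mem' g.f = stb_vorbis.floor_count mem g.f := by
    simp only [vacc, voff]
    exact hobj.i32 _ (by omega) (by omega) (by omega)
  have hcfg : stb_vorbis.floor_config mem' g.f = stb_vorbis.floor_config mem g.f := by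
    simp only [vacc, voff]
    exact hobj.ptr _ (by omega) (by omega) (by omega)
  have hcc : stb_vorbis.codebook_count mem' g.f = stb_vorbis.codebook_count mem g.f := by
    simp only [vacc, voff]
    exact hobj.i32 _ (by omega) (by omega) (by omega)
  have hft : ∀ i' : Nat, i' < 64 → stb_vorbis.floor_types mem' g.f i' = stb_vorbis.floor_types mem g.f i' := by
    intro i' hi'
    simp only [vacc, voff]
    exact hobj.u16 _ (by omega) (by omega) (by omega)
  have hi64 : i < 64 := by
    have h1 := h.floors.FL1
    have h2 := h.cur.base.base.lt
    omega
  have hslot28 : mem'.i32 (g.R + 0x28) = mem.i32 (g.R + 0x28) := hslots.i32 _ (by omega) (by omega) (by omega)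
  refine ⟨?_, ?_, ?_, ?_, ?_, ?_, ?_, ?_, h.shadow.untouched hsh, ?_, ?_, ?_, ?_, ?_, ?_, ?_⟩
  · rw [hslots.u64 _ (by omega) (by omega) (by omega)]
    exact h.shadowIdx
  · rw [hsaved.u64 _ (by omega) (by omega) (by omega)]
    exact h.saved_rbx
  · rw [hsaved.u64 _ (by omega) (by omega) (by omega)]
    exact h.saved_rbp
  · rw [hsaved.u64 _ (by omega) (by omega) (by omega)]
    exact h.saved_r12
  · rw [hsaved.u64 _ (by omega) (by omega) (by omega)]
    exact h.saved_r13
  · rw [hsaved.u64 _ (by omega) (by omega) (by omega)]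
    exact h.saved_r14
  · rw [hsaved.u64 _ (by omega) (by omega) (by omega)]
    exact h.saved_r15
  · rw [hsaved.u64 _ (by omega) (by omega) (by omega)]
    exact h.saved_ra
  · -- SH7 of `log2_4`
    intro k hk
    have e : Vorbis.Globals.log2_4.beg = 0x120640 := rfl
    rw [e]
    have := hlog.u8 (0x120640 + k) (by omega) (by omega) (by omega)
    unfold Mem.u8 addr at this
    rw [this]
    have := h.sh7 k hk
    rw [e] at this
    exact this
  · -- the point `Mid`
    have hobjS : (objBlock g.f).Same mem mem' := by
      simp only [vblock, voff]
      exact hobj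
    apply h.mid.frame
    · apply ObjEq.of_eqOn
      · intro w hw
        have hhi5 := Mid.hi_le 5
        simp only [Mid.winsAt, List.mem_cons, List.mem_nil_iff, or_false] at hw
        rcases hw with rfl | rfl | rfl | rfl | rfl | rfl
        all_goals (simp only []; omega)
      · intro w hw
        have hhi5 := Mid.hi_le 5
        simp only [Mid.winsAt, List.mem_cons, List.mem_nil_iff, or_false] at hw
        rcases hw with rfl | rfl | rfl | rfl | rfl | rfl
        all_goals (exact Mem.EqOn.mono hobj (by simp only []; omega) (by simp only []; omega))
    · exact hk5
    · exact h.mid.consts.frame (Mem.EqOn.mono hslots (Nat.le_refl _) (by omega)) (by omega)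
    · intro h6
      exact absurd h6 (by omega)
    · exact hsh
    · apply h.mid.arena.frame (by simp only [voff]; omega)
      simp only [voff]
      exact Mem.EqOn.mono hobj (by omega) (by omega)
    · exact h.mid.bits.frame (ObjSame.of_same hobjS (by simp only [voff]; omega))
  · -- the loop counter's slot
    unfold StartDecoder.slot
    rw [hslots.u32 _ (by omega) (by omega) (by omega)]
    exact h.cnt
  · rw [hfc]
    exact h.i_le
  · exact h.floors.frame hfc hcfg hcc (fun i' hi' => hft i' (by omega)) hkfl
  · -- longest_floorlist
    obtain ⟨l1, l2, l3, l4⟩ := h.lfl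
    refine ⟨?_, ?_, ?_, ?_⟩
    · rw [hslot28]
      apply l1.of_eq hcfg
      intro i' hi'
      have hk := hkfl i' hi'
      simp only [Floor1.values, voff]
      apply hk.i32
      · simp only [voff]
        omega
      · simp only [voff]
        omega
    · rw [hslot28]
      exact l2
    · rw [hslot28]
      exact l3
    · rw [hslot28]
      exact l4
  · exact floor6_frame h.cur hfc hcfg hcc (hft i hi64) hlo hhi hg hn

/-- `*f` lies in the data space (it is inside a live object). -/
theorem f_inside {g : Ghost} {A : Arena × List Obj} {mem : Mem} (hh : g.Hand A) (hsh : ShadowInv A.2 g.frames' g.R mem) :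
    0x100000 ≤ g.f ∧ g.f + Off.sizeof.stb_vorbis ≤ 0xC00000 := by
  have hl : LiveIn A.2 g.frames' g.f Off.sizeof.stb_vorbis := by
    obtain ⟨o, ho, k1, k2⟩ := hh.obj
    refine ⟨o, ?_, k1, k2⟩
    unfold Ghost.frames'
    rw [stackObjs_cons]
    rcases List.mem_append.mp ho with h1 | h2
    · exact List.mem_append_left _ (List.mem_append_right _ h1)
    · exact List.mem_append_right _ h2
  exact hl.inside hsh (by simp only [voff]; omega)

/-- A window of the segment's footprint: a piece of the own stack that is no slot of the assertion (the callees' stack below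
`R + 8`; the array `p` = `[R + 120H, R + 508H)`), or a piece of `sorted_order[250]` of the element under construction. -/
def OkSpan (g : Ghost) (gi : Nat) (w : Span) : Prop :=
  (g.R - 408 ≤ w.lo ∧ w.hi ≤ g.R + 8) ∨ (g.R + 0x120 ≤ w.lo ∧ w.hi ≤ g.R + 0x508) ∨ (gi + 838 ≤ w.lo ∧ w.hi ≤ gi + 1088)

/-- **`MemPart` over the footprint of the segment**: every window is an `OkSpan`. -/
theorem MemPart.carry_ws {g : Ghost} {i : Nat} {A5 : Arena} {A : Arena × List Obj} {mc : Int} {n : Nat} {mem mem' : Mem}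
    (h : MemPart g i A5 A mc n mem) (hn : n ≤ 16) (hh : g.Hand A) (hc : ∀ bF, bF ∈ g.frames → g.RA + 8 ≤ bF.1)
    (hR : g.R + 1480 = g.RA) (hlo : 0x700000 + 408 ≤ g.R) (hhi : g.RA + 8 ≤ 0x800000)
    {ws : List Span} (hs : Mem.SameExcept ws mem mem') (hw : ∀ w, w ∈ ws → OkSpan g (floorAt g mem i) w) :
    MemPart g i A5 A mc n mem' := by
  have ha := h.mid.arena
  have hfw := f6_obj_where hh h.shadow hc
  have hout := hh.objOut
  have hfin := f_inside hh h.shadow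
  simp only [voff] at hfw hout hfin
  have hFBs : Since A5 A.1 (floorBlock mem g.f) := h.floors.FL2
  have hFB : A.1.Blk (floorBlock mem g.f) := hFBs.1
  have hFin := arena_inside ha hFB
  have hFoff := ha.blk_off_stack hFB
  have hb := ha.bounds
  have hlt := h.cur.base.base.lt
  have hel := h.floors.toFloorShape.elem_in (IsFloor.of_lt hlt) (off := 0) (n := Off.sizeof.Floor) (Nat.le_refl _)
  have hlog := hh.outside ⟨0x120640, 16⟩ (by
    simp only [fixedBlocks, globalBlocks, List.mem_cons, true_or, or_true])
  have hatext := hh.arenaText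
  have etext : L.textHi = 0x119d40 := rfl
  simp only [Block.contains, Nat.add_zero, voff] at hel
  simp only [] at hlog
  have egi : floorAt g mem i = stb_vorbis.floor_config_at mem g.f i := rfl
  rw [egi] at hw
  generalize hFBe : floorBlock mem g.f = FB at *
  obtain ⟨FBb, FBs⟩ := FB
  simp only [] at hFin hFoff hel
  -- every window, as arithmetic
  have hww : ∀ w, w ∈ ws → (g.R - 408 ≤ w.lo ∧ w.hi ≤ g.R + 8) ∨ (g.R + 0x120 ≤ w.lo ∧ w.hi ≤ g.R + 0x508) ∨
      (stb_vorbis.floor_config_at mem g.f i + 838 ≤ w.lo ∧ w.hi ≤ stb_vorbis.floor_config_at mem g.f i + 1088) := hw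
  apply h.carry hn (by omega) (by simp only [voff]; omega)
  · apply hs.eqOn
    intro w hwm
    have := hww w hwm
    omega
  · intro B hB
    have hBA : A.1.Blk B := hB.mono h.mid.extc
    have hne : B ≠ ⟨FBb, FBs⟩ := Since.ne_old hB hFBs
    have hd := arena_disjoint ha hBA hFB hne
    have hoff := ha.blk_off_stack hBA
    have hBin := arena_inside ha hBA
    simp only [Block.disjoint] at hd
    apply Block.Kept.of_sameExcept hs
    · intro w hwm
      have := hww w hwm
      omega
    · omega
  · intro i' hi'
    have hlt' : (i' : Int) < stb_vorbis.floor_count mem g.f := by omega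
    have hel' := h.floors.toFloorShape.elem_in (IsFloor.of_lt hlt') (off := 0) (n := Off.sizeof.Floor) (Nat.le_refl _)
    have hdj := FloorShape.elems_disjoint mem g.f (i := i') (i' := i) (by omega)
    rw [hFBe] at hel'
    simp only [Block.contains, Block.disjoint, Nat.add_zero, voff] at hel' hdj
    apply Block.Kept.of_sameExcept hs
    · intro w hwm
      have := hww w hwm
      simp only [voff]
      omega
    · simp only [voff]
      omega
  · rw [egi]
    apply hs.eqOn
    intro w hwm
    have := hww w hwm
    omega
  · rw [egi]
    apply hs.eqOn
    intro w hwm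
    have := hww w hwm
    omega
  · rw [egi]
    omega
  · apply hs.eqOn
    intro w hwm
    have := hww w hwm
    omega
  · apply hs.eqOn
    intro w hwm
    have := hww w hwm
    omega
  · apply hs.eqOn
    intro w hwm
    have := hww w hwm
    omega
  · apply hs.eqOn
    intro w hwm
    have := hww w hwm
    omega

/-- **The assertion at every cut point of the segment** (the entry, the three loop heads, the exit): `BodyF6` with the program
counter as a parameter and the memory-dependent part folded into `MemPart`. -/
structure St (u₀ : State) (g : Ghost) (pc : Word) (i : Nat) (A5 : Arena) (A : Arena × List Obj) (mc : Int) (n : Nat)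
    (v : State) : Prop where
  entry : AtEntry (conv u₀) L.start_decoder.entry depth g.ret g.e
  rip : v.rip = pc
  rsp : v.reg .rsp = addr g.R
  rbp : v.reg .rbp = addr g.f
  rbx : v.reg .rbx = addr (floorAt g v.mem i)
  code : CodeOK u₀ v.mem
  inv : abiInv v
  offText : ∀ o, o ∈ A.2 → L.textHi ≤ o.base
  ext : g.A0.1.Extends A.1
  callers : ∀ bF, bF ∈ g.frames → g.RA + 8 ≤ bF.1
  hand : g.Hand A
  same : Mem.SameExcept (footprint g) g.e.mem v.mem
  part : MemPart g i A5 A mc n v.mem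
  n_le : n ≤ 16

/-- The entry assertion of the segment gives `St` (with the class transient cut at 16). -/
theorem St.of_body {u₀ : State} {g : Ghost} {i : Nat} {A5 : Arena} {A : Arena × List Obj} {mc : Int} {n : Nat} {v : State}
    (h : BodyF6 u₀ g i A5 A mc n v) : St u₀ g pc_F6 i A5 A mc (min n 16) v := by
  have hf := h.loop.frame
  exact ⟨hf.entry, hf.rip, hf.rsp, h.loop.rbp, h.rbx, hf.code, hf.inv, hf.offText, hf.ext, hf.callers, h.loop.hand, hf.same,
    ⟨hf.shadowIdx, hf.saved_rbx, hf.saved_rbp, hf.saved_r12, hf.saved_r13, hf.saved_r14, hf.saved_r15, hf.saved_ra, hf.shadow,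
      hf.sh7, h.loop.mid, h.loop.cnt, h.loop.i_le, h.loop.floors, h.loop.lfl, floor6_cut h.cur⟩, Nat.min_le_right _ _⟩

/-- `St` gives the common part `FloorLoop` of the floor section's assertions. -/
theorem St.floorLoop {u₀ : State} {g : Ghost} {pc : Word} {i : Nat} {A5 : Arena} {A : Arena × List Obj} {mc : Int} {n : Nat}
    {v : State} (h : St u₀ g pc i A5 A mc n v) : FloorLoop u₀ g pc i A5 A v := by
  have p := h.part
  exact ⟨⟨h.entry, h.rip, h.rsp, p.shadowIdx, p.saved_rbx, p.saved_rbp, p.saved_r12, p.saved_r13, p.saved_r14, p.saved_r15,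
    p.saved_ra, h.code, h.inv, p.shadow, h.offText, h.ext, h.callers, p.sh7, h.same⟩, h.hand, p.mid, h.rbp, p.cnt, p.i_le,
    p.floors, p.lfl⟩

/-- The numbers of the frame: `R + 1480 = RA`, the stack's room. -/
theorem St.nums {u₀ : State} {g : Ghost} {pc : Word} {i : Nat} {A5 : Arena} {A : Arena × List Obj} {mc : Int} {n : Nat}
    {v : State} (h : St u₀ g pc i A5 A mc n v) :
    g.R + 1480 = g.RA ∧ 0x700000 + 408 ≤ g.R ∧ g.RA + 8 ≤ 0x800000 ∧ g.R % 8 = 0 := by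
  have h1 := h.entry.align
  have h2 := h.entry.room
  have h3 := h.entry.top
  simp only [vspec, Vorbis.conv_stackLo, Vorbis.conv_stackHi] at h2 h3
  unfold Ghost.R
  have e : g.RA = (g.e.reg .rsp).toNat := rfl
  simp only [depth, steady] at h2 ⊢
  omega

/-- **From one cut point to the next**: the registers `rsp rbp rbx` kept, the text and DF / MXCSR kept, and every window of the
stores in between an `OkSpan`. -/
theorem St.step {u₀ : State} {g : Ghost} {pc pc' : Word} {i : Nat} {A5 : Arena} {A : Arena × List Obj} {mc : Int} {n : Nat}
    {v s : State} (h : St u₀ g pc i A5 A mc n v) (hrip : s.rip = pc') (hrsp : s.reg .rsp = v.reg .rsp)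
    (hrbp : s.reg .rbp = v.reg .rbp) (hrbx : s.reg .rbx = v.reg .rbx) (hcode : CodeOK u₀ s.mem) (hinv : abiInv s)
    {ws : List Span} (hs : Mem.SameExcept ws v.mem s.mem) (hw : ∀ w, w ∈ ws → OkSpan g (floorAt g v.mem i) w) :
    St u₀ g pc' i A5 A mc n s := by
  obtain ⟨n1, n2, n3, n4⟩ := h.nums
  have hpart := h.part.carry_ws h.n_le h.hand h.callers n1 n2 n3 hs hw
  have hfin := f_inside h.hand h.part.shadow
  have hfw := f6_obj_where h.hand h.part.shadow h.callers
  simp only [voff] at hfin hfw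
  have hFB : A.1.Blk (floorBlock v.mem g.f) := h.part.floors.FL2.1
  have hFin := arena_inside h.part.mid.arena hFB
  have hel := h.part.floors.toFloorShape.elem_in (IsFloor.of_lt h.part.cur.base.base.lt) (off := 0) (n := Off.sizeof.Floor)
    (Nat.le_refl _)
  simp only [Block.contains, Nat.add_zero, voff] at hel
  have egi : floorAt g v.mem i = stb_vorbis.floor_config_at v.mem g.f i := rfl
  have hww : ∀ w, w ∈ ws → (g.R - 408 ≤ w.lo ∧ w.hi ≤ g.R + 8) ∨ (g.R + 0x120 ≤ w.lo ∧ w.hi ≤ g.R + 0x508) ∨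
      (stb_vorbis.floor_config_at v.mem g.f i + 838 ≤ w.lo ∧ w.hi ≤ stb_vorbis.floor_config_at v.mem g.f i + 1088) := by
    rw [← egi]
    exact hw
  have hcfg : stb_vorbis.floor_config s.mem g.f = stb_vorbis.floor_config v.mem g.f := by
    have hout := h.hand.objOut
    simp only [voff] at hout
    have he : Mem.EqOn g.f (g.f + 1808) v.mem s.mem := by
      apply hs.eqOn
      intro w hwm
      have := hww w hwm
      omega
    simp only [vacc, voff]
    exact he.ptr _ (by omega) (by omega) (by omega)
  refine ⟨h.entry, hrip, by rw [hrsp]; exact h.rsp, by rw [hrbp]; exact h.rbp, ?_, hcode, hinv, h.offText, h.ext, h.callers,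
    h.hand, ?_, hpart, h.n_le⟩
  · rw [hrbx, floorAt_eq i hcfg]
    exact h.rbx
  · -- the function's footprint: the stack window and the arena
    apply h.same.step_same hs
    intro w hwm a ha1 ha2
    have hB := h.ext.B
    have hL := h.ext.L
    rcases hww w hwm with h1 | h1 | h1
    · refine ⟨⟨g.RA - depth, g.RA⟩, List.mem_cons_self, ?_, ?_⟩
      · simp only [depth]
        omega
      · simp only []
        omega
    · refine ⟨⟨g.RA - depth, g.RA⟩, List.mem_cons_self, ?_, ?_⟩
      · simp only [depth]
        omega
      · simp only []
        omega
    · refine ⟨⟨g.A0.1.B, g.A0.1.B + g.A0.1.L⟩, ?_, ?_, ?_⟩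
      · unfold footprint writes
        exact List.mem_cons_of_mem _ (List.mem_cons_of_mem _ (List.mem_cons_of_mem _ List.mem_cons_self))
      · simp only []
        omega
      · simp only []
        omega

/-- Over the stores of `St.step` the element under construction keeps its address and its `values`. -/
theorem St.step_eqs {u₀ : State} {g : Ghost} {pc : Word} {i : Nat} {A5 : Arena} {A : Arena × List Obj} {mc : Int} {n : Nat}
    {v : State} {mem' : Mem} (h : St u₀ g pc i A5 A mc n v)
    {ws : List Span} (hs : Mem.SameExcept ws v.mem mem') (hw : ∀ w, w ∈ ws → OkSpan g (floorAt g v.mem i) w) :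
    floorAt g mem' i = floorAt g v.mem i ∧
      Floor1.values mem' (floorAt g v.mem i) = Floor1.values v.mem (floorAt g v.mem i) := by
  obtain ⟨n1, n2, n3, n4⟩ := h.nums
  have hfin := f_inside h.hand h.part.shadow
  have hfw := f6_obj_where h.hand h.part.shadow h.callers
  simp only [voff] at hfin hfw
  have hFB : A.1.Blk (floorBlock v.mem g.f) := h.part.floors.FL2.1
  have hFin := arena_inside h.part.mid.arena hFB
  have hFoff := h.part.mid.arena.blk_off_stack hFB
  have hel := h.part.floors.toFloorShape.elem_in (IsFloor.of_lt h.part.cur.base.base.lt) (off := 0) (n := Off.sizeof.Floor)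
    (Nat.le_refl _)
  simp only [Block.contains, Nat.add_zero, voff] at hel
  have egi : floorAt g v.mem i = stb_vorbis.floor_config_at v.mem g.f i := rfl
  have hww : ∀ w, w ∈ ws → (g.R - 408 ≤ w.lo ∧ w.hi ≤ g.R + 8) ∨ (g.R + 0x120 ≤ w.lo ∧ w.hi ≤ g.R + 0x508) ∨
      (stb_vorbis.floor_config_at v.mem g.f i + 838 ≤ w.lo ∧ w.hi ≤ stb_vorbis.floor_config_at v.mem g.f i + 1088) := by
    rw [← egi]
    exact hw
  have hout := h.hand.objOut
  simp only [voff] at hout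
  have hb := h.part.mid.arena.bounds
  constructor
  · apply floorAt_eq
    have he : Mem.EqOn g.f (g.f + 1808) v.mem mem' := by
      apply hs.eqOn
      intro w hwm
      have := hww w hwm
      omega
    simp only [vacc, voff]
    exact he.ptr _ (by omega) (by omega) (by omega)
  · rw [egi]
    have he : Mem.EqOn (stb_vorbis.floor_config_at v.mem g.f i + 1088) (stb_vorbis.floor_config_at v.mem g.f i + 1596)
        v.mem mem' := by
      apply hs.eqOn
      intro w hwm
      have := hww w hwm
      omega
    simp only [Floor1.values, voff]
    exact he.i32 _ (by omega) (by omega) (by omega)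

/-- FL8 with FL4 – FL6: `2 ≤ values ≤ 250` for the element under construction. -/
theorem floor6_values {g : Ghost} {mem : Mem} {i : Nat} {mc : Int} {n : Nat} (h : Floor6 g mem i mc n) :
    2 ≤ Floor1.values mem (floorAt g mem i) ∧ Floor1.values mem (floorAt g mem i) ≤ 250 := by
  obtain ⟨⟨⟨hlt, h3, h4, hmc1, hmc2, hpcl⟩, hcls, hmcn⟩, h7, h8, hxl⟩ := h
  generalize floorAt g mem i = gi at *
  have hs := sumTo_le_mul (fun j => Floor1.class_dimensions mem gi (Floor1.partition_class_list mem gi j)) 8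
    (Floor1.partitions mem gi) (by
      intro j hj
      have hc := (hpcl j hj).1
      have hmcj := (hpcl j hj).2
      exact (hcls _ (by omega)).dim.2)
  unfold Floor1.dimSum at h8
  omega

/-- `values` as the unsigned dword the code loads: a number `V` in `[2, 250]`. -/
theorem values_read {g : Ghost} {mem : Mem} {i : Nat} {mc : Int} {n : Nat} (h : Floor6 g mem i mc n) :
    ∃ V : Nat, mem.u32 (floorAt g mem i + 1592) = V ∧ 2 ≤ V ∧ V ≤ 250 ∧ Floor1.values mem (floorAt g mem i) = (V : Int) := by
  have hv := floor6_values h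
  refine ⟨_, rfl, ?_⟩
  have e : Floor1.values mem (floorAt g mem i) = sint32 (mem.u32 (floorAt g mem i + 1592)) := by
    simp only [vacc, voff]
    rfl
  rw [e] at hv ⊢
  have hc := sint32_cases (mem.u32 (floorAt g mem i + 1592))
  have hl := Mem.u32_lt mem (floorAt g mem i + 1592)
  omega

/-- `*f` inside one live object, for the frames inside the function. -/
theorem live_f {g : Ghost} {A : Arena × List Obj} (hh : g.Hand A) : LiveIn A.2 g.frames' g.f Off.sizeof.stb_vorbis := by
  obtain ⟨o, ho, k1, k2⟩ := hh.obj
  refine ⟨o, ?_, k1, k2⟩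
  unfold Ghost.frames'
  rw [stackObjs_cons]
  rcases List.mem_append.mp ho with h1 | h2
  · exact List.mem_append_left _ (List.mem_append_right _ h1)
  · exact List.mem_append_right _ h2

/-- The array `p` (250 records of 4 bytes at `[R + 120H]`) is an object of the own protected frame. -/
theorem live_p (g : Ghost) (A : Arena × List Obj) : LiveIn A.2 g.frames' (g.R + 0x120) 1000 := by
  refine ⟨⟨g.base + 208, 1000, .stack⟩, ?_, ?_, ?_⟩
  · apply List.mem_append_left
    unfold Ghost.frames'
    rw [stackObjs_cons]
    apply List.mem_append_left
    unfold FrameLayout.objsAt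
    apply List.mem_map.mpr
    refine ⟨⟨"p", 208, 1000⟩, ?_, rfl⟩
    simp only [Vorbis.Frames.start_decoder, List.mem_cons, true_or, or_true]
  · simp only [Ghost.base]
    omega
  · simp only [Ghost.base]
    omega

/-- The floor element under construction lies inside one live object (the block of FL2, an arena block). -/
theorem St.live_g {u₀ : State} {g : Ghost} {pc : Word} {i : Nat} {A5 : Arena} {A : Arena × List Obj} {mc : Int} {n : Nat}
    {v : State} (h : St u₀ g pc i A5 A mc n v) : LiveIn A.2 g.frames' (floorAt g v.mem i) 1596 := by
  have hFB : A.1.Blk (floorBlock v.mem g.f) := h.part.floors.FL2.1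
  have hl : LiveIn A.2 g.frames' (floorBlock v.mem g.f).base (floorBlock v.mem g.f).size :=
    liveIn_of_arenaBlk h.part.mid.arena hFB
  have hel := h.part.floors.toFloorShape.elem_in (IsFloor.of_lt h.part.cur.base.base.lt) (off := 0) (n := Off.sizeof.Floor)
    (Nat.le_refl _)
  simp only [Block.contains, Nat.add_zero, voff] at hel
  have egi : floorAt g v.mem i = stb_vorbis.floor_config_at v.mem g.f i := rfl
  rw [egi]
  exact hl.sub _ _ hel.1 hel.2

/-- Where the element under construction is: in the data space, off the stack region, above the text. -/
theorem St.where_g {u₀ : State} {g : Ghost} {pc : Word} {i : Nat} {A5 : Arena} {A : Arena × List Obj} {mc : Int} {n : Nat}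
    {v : State} (h : St u₀ g pc i A5 A mc n v) :
    0x119d40 ≤ floorAt g v.mem i ∧ floorAt g v.mem i + 1596 ≤ 0xC00000 ∧
      (floorAt g v.mem i + 1596 ≤ 0x700000 ∨ 0x800000 ≤ floorAt g v.mem i) := by
  have hFB : A.1.Blk (floorBlock v.mem g.f) := h.part.floors.FL2.1
  have hoff := h.part.mid.arena.blk_off_stack hFB
  have hin := arena_inside h.part.mid.arena hFB
  have hb := h.part.mid.arena.bounds
  have ht := h.hand.arenaText
  have etext : L.textHi = 0x119d40 := rfl
  have hel := h.part.floors.toFloorShape.elem_in (IsFloor.of_lt h.part.cur.base.base.lt) (off := 0) (n := Off.sizeof.Floor)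
    (Nat.le_refl _)
  simp only [Block.contains, Nat.add_zero, voff] at hel
  have egi : floorAt g v.mem i = stb_vorbis.floor_config_at v.mem g.f i := rfl
  rw [egi]
  omega

/-! ### The walks proved so far: entry → head of loop 4015; one round of loop 4015 -/

/-- `movsxd` of a small non-negative counter held zero-extended in a register is the counter. -/
theorem f6_sext_ofNat (j : Nat) (hj : j < 2 ^ 31) :
    (Word.ofBV (BitVec.signExtend 64 (Word.part .w32 (UInt64.ofNat j)))).toNat = j := by
  rw [toNat_sext32]
  · rw [Vorbis.toNat_part32, Code.toNat_ofNat_lt _ (by omega)]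
    exact Nat.mod_eq_of_lt (by omega)
  · rw [Vorbis.toNat_part32, Code.toNat_ofNat_lt _ (by omega), Nat.mod_eq_of_lt (by omega)]
    exact hj

/-- The branch hypothesis of a signed 32-bit `cmp ; jg` between a small counter and a small bound, as numbers. -/
theorem lt_of_hbr (j V : Nat) (hj : j < 2 ^ 31) (hV : V < 2 ^ 31)
    (h : (Word.part .w32 (UInt64.ofNat j)).toInt < (BitVec.ofNat 32 V).toInt) : j < V := by
  rw [Vorbis.Spec.part32_toInt, Vorbis.toInt_ofNat32 V (by omega), Code.toNat_ofNat_lt _ (by omega)] at h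
  have c1 := sint32_cases (j % 2 ^ 32)
  have c2 := sint32_cases V
  omega

/-- The converse of `lt_of_hbr`: the taken arm of the `jg`. -/
theorem hbr_of_lt (j V : Nat) (hj : j < 2 ^ 31) (hV : V < 2 ^ 31) (h : j < V) :
    (Word.part .w32 (UInt64.ofNat j)).toInt < (BitVec.ofNat 32 V).toInt := by
  rw [Vorbis.Spec.part32_toInt, Vorbis.toInt_ofNat32 V (by omega), Code.toNat_ofNat_lt _ (by omega)]
  have c1 := sint32_cases (j % 2 ^ 32)
  have c2 := sint32_cases V
  omega

/-- `add r12d, 1` on a small counter held zero-extended. -/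
theorem f6_inc32_ofNat (j : Nat) (hj : j + 1 < 2 ^ 32) :
    Word.ofBV (Word.part Width.w32 (UInt64.ofNat j) + 1#32) = UInt64.ofNat (j + 1) := by
  have e : (Word.ofBV (Word.part Width.w32 (UInt64.ofNat j) + 1#32)).toNat = j + 1 := by
    rw [Vorbis.toNat_ofBV32, BitVec.toNat_add, Vorbis.toNat_part32, Code.toNat_ofNat_lt _ (by omega)]
    have e1 : (1#32).toNat = 1 := by decide
    rw [e1]
    omega
  exact eq_addr _ _ e

/-- The invariant of loop 4015 at its head 0x115768: `r12 = j ≤ values`, the `id`s of the records below `j` are set. -/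
def Inv1 (u₀ : State) (g : Ghost) (i : Nat) (A5 : Arena) (A : Arena × List Obj) (mc : Int) (n : Nat) (v : State) : Prop :=
  ∃ j : Nat, St u₀ g Vorbis.L.start_decoder.loop23 i A5 A mc n v ∧ v.reg .r12 = UInt64.ofNat j ∧
    (j : Int) ≤ Floor1.values v.mem (floorAt g v.mem i) ∧ PFill v.mem (g.R + 0x120) j

/-- 0x115714 – 0x115719 (`j = 0 ; jmp head`): the entry assertion gives the invariant of loop 4015 with `j = 0`. -/
theorem walk_entry (Lay : Layout) (hLay : Lay.hi = 0x1000000) (μ : Microarch) (hμ : UserX.MicroOK μ) (u₀ : State)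
    (hcode : HasCodeNat Lay u₀ Vorbis.L.start_decoder.entry Vorbis.Code.code_start_decoder.nat Vorbis.L.start_decoder.size)
    (g : Ghost) (i : Nat) (A5 : Arena) (A : Arena × List Obj) (mc : Int) (n : Nat) (v : State)
    (hst : St u₀ g pc_F6 i A5 A mc n v) : ReachVia Lay μ WayInv v (Inv1 u₀ g i A5 A mc n) := by
  obtain ⟨n1, n2, n3, n4⟩ := hst.nums
  obtain ⟨sp, hsp⟩ : ∃ sp : Word, sp = addr g.R := ⟨_, rfl⟩
  have hspn : sp.toNat = g.R := by
    rw [hsp]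
    exact toNat_addr _ (by omega)
  have w_rip := hst.rip
  have w_rsp : v.reg .rsp = sp := by
    rw [hsp]
    exact hst.rsp
  have w_eq : Mem.EqOn Vorbis.L.textLo Vorbis.L.textHi u₀.mem v.mem := hst.code
  have hdf : v.flags .df = false := (show abiInv _ from hst.inv).1
  have hmx : v.mxcsr &&& 0x1F80 = 0x1F80 := (show abiInv _ from hst.inv).2
  have hsse := Vorbis.sseOK_of_abiInv hst.inv
  have z24 : v.mem.readLE (sp + 36) 4 = 0 := by
    have := hst.part.mid.consts.z24 (by omega) (by omega)
    rw [hsp]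
    simp only [vfield]
    exact this
  u_walk hcode [hμ.vendor] until [Vorbis.L.start_decoder.loop23] span [Vorbis.L.textLo, Vorbis.L.textHi] side (v_side)
  refine ReachVia.done ⟨0, ?_, w_r12, ?_, PFill.zero _ _⟩
  · refine hst.step w_rip (w_kept.get .rsp rfl) (w_kept.get .rbp rfl) (w_kept.get .rbx rfl) ?_ ?_
      (ws := []) ?_ ?_
    · exact w_eq
    · v_inv
    · rw [w_mem]
      exact Mem.SameExcept.refl _ _
    · intro w hw
      exact absurd hw List.not_mem_nil
  · rw [w_mem]
    have := floor6_values hst.part.cur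
    omega

/-- The invariant of loop 4020 at its head 0x11579e: `r12 = j ≤ values`, PID. -/
def Inv2 (u₀ : State) (g : Ghost) (i : Nat) (A5 : Arena) (A : Arena × List Obj) (mc : Int) (n : Nat) (v : State) : Prop :=
  ∃ j : Nat, St u₀ g Vorbis.L.start_decoder.loop24 i A5 A mc n v ∧ v.reg .r12 = UInt64.ofNat j ∧
    (j : Int) ≤ Floor1.values v.mem (floorAt g v.mem i) ∧ PID v.mem (floorAt g v.mem i) (g.R + 0x120)

/-- **One round of loop 4015** (0x115768 … 0x115764, the arm `j < values` of the `jg` at 0x11577d): the check of `g->values`,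
the load of `Xlist[j]`, the two checked stores into `p[j]`, `++j`; back at the head with the invariant for `j + 1`. (The other
arm of the `jg` — the call of qsort — contradicts `hjlt` here; it is the next lemma's.) -/
theorem walk_loop1_body (Lay : Layout) (hLay : Lay.hi = 0x1000000) (μ : Microarch) (hμ : UserX.MicroOK μ) (u₀ : State)
    (hcode : HasCodeNat Lay u₀ Vorbis.L.start_decoder.entry Vorbis.Code.code_start_decoder.nat Vorbis.L.start_decoder.size)
    (hload2 : Asan.SmallCheck Lay μ Vorbis.WayInv (Vorbis.CodeOK u₀) [.rax, .rcx, .rdx] 2 Vorbis.L.__asan_load2_noabort.entry)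
    (hstore2 : Asan.SmallCheck Lay μ Vorbis.WayInv (Vorbis.CodeOK u₀) [.rax, .rcx, .rdx] 2 Vorbis.L.__asan_store2_noabort.entry)
    (hload4 : Asan.SmallCheck Lay μ Vorbis.WayInv (Vorbis.CodeOK u₀) [.rax, .rcx, .rdx] 4 Vorbis.L.__asan_load4_noabort.entry)
    (g : Ghost) (i : Nat) (A5 : Arena) (A : Arena × List Obj) (mc : Int) (n : Nat)
    (hq : Calls Lay μ Vorbis.WayInv (Vorbis.conv u₀) Vorbis.L.qsort.entry
      (Vorbis.Spec.qsort.spec A.2 g.frames' Vorbis.L.point_compare.entry 4))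
    (v : State) (j : Nat) (hst : St u₀ g Vorbis.L.start_decoder.loop23 i A5 A mc n v) (hr12 : v.reg .r12 = UInt64.ofNat j)
    (hjlt : (j : Int) < Floor1.values v.mem (floorAt g v.mem i)) (hfill : PFill v.mem (g.R + 0x120) j) :
    ReachVia Lay μ WayInv v (fun v' =>
      Inv1 u₀ g i A5 A mc n v' ∧ 250 - (v'.reg .r12).toNat < 250 - (v.reg .r12).toNat) := by
  have hjv : (j : Int) ≤ Floor1.values v.mem (floorAt g v.mem i) := by omega
  obtain ⟨n1, n2, n3, n4⟩ := hst.nums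
  have hspn : (v.reg .rsp).toNat = g.R := by
    rw [hst.rsp]
    exact toNat_addr _ (by omega)
  have hwg := hst.where_g
  have hlg := hst.live_g
  obtain ⟨V, hVr, hV2, hV250, hVi⟩ := values_read hst.part.cur
  have hgbn : (v.reg .rbx).toNat = floorAt g v.mem i := by
    rw [hst.rbx]
    exact toNat_addr _ (by omega)
  have w_rip := hst.rip
  have w_eq : Mem.EqOn Vorbis.L.textLo Vorbis.L.textHi u₀.mem v.mem := hst.code
  have hdf : v.flags .df = false := (show abiInv _ from hst.inv).1
  have hmx : v.mxcsr &&& 0x1F80 = 0x1F80 := (show abiInv _ from hst.inv).2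
  have hsse := Vorbis.sseOK_of_abiInv hst.inv
  have z24 : v.mem.readLE (v.reg .rsp + 36) 4 = 0 := by
    have := hst.part.mid.consts.z24 (by omega) (by omega)
    rw [hst.rsp]
    simp only [vfield]
    exact this
  have rV : v.mem.readLE (v.reg .rbx + 1592) 4 = V := by
    rw [hst.rbx]
    simp only [vfield]
    exact hVr
  have hsh := hst.part.shadow
  rw [hVi] at hjv hjlt
  have hjV : j ≤ V := by omega
  have hjltV : j < V := by omega
  have hr12n : (v.reg .r12).toNat = j := by
    rw [hr12]
    exact Code.toNat_ofNat_lt _ (by omega)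
  generalize hgi : floorAt g v.mem i = gi at *
  u_walk hcode [hμ.vendor] until [Vorbis.L.start_decoder.loop23, Vorbis.L.start_decoder.loop24] span [Vorbis.L.textLo, Vorbis.L.textHi] side (v_side)
  · -- 0x11576f: load4 `g->values`
    have hun : ShadowUntouched v.mem s_11576f.mem := by v_untouched
    exact hlg.accSmall hsh hun _ 4 (by decide) (by u_omega) (by u_omega)
  · -- 0x11572e: load2 `g->Xlist[j]`
    have hJ := f6_sext_ofNat j (by omega)
    generalize Word.ofBV (BitVec.signExtend 64 (Word.part Width.w32 (UInt64.ofNat j))) = J at *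
    have hun : ShadowUntouched v.mem s_11572e.mem := by v_untouched
    exact hlg.accSmall hsh hun _ 2 (by decide) (by u_omega) (by u_omega)
  · -- 0x115744: store2 `p[j].x`
    have hJ := f6_sext_ofNat j (by omega)
    have hlt : j < V := lt_of_hbr j V (by omega) (by omega) hbr_11577d
    generalize Word.ofBV (BitVec.signExtend 64 (Word.part Width.w32 (UInt64.ofNat j))) = J at *
    have hun : ShadowUntouched v.mem s_115744.mem := by v_untouched
    exact (live_p g A).accSmall hsh hun _ 2 (by decide) (by u_omega) (by u_omega)
  · -- the store misses the text
    have hJ := f6_sext_ofNat j (by omega)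
    have hlt : j < V := lt_of_hbr j V (by omega) (by omega) hbr_11577d
    generalize Word.ofBV (BitVec.signExtend 64 (Word.part Width.w32 (UInt64.ofNat j))) = J at *
    u_omega
  · -- 0x115756: store2 `p[j].id`
    have hJ := f6_sext_ofNat j (by omega)
    have hlt : j < V := lt_of_hbr j V (by omega) (by omega) hbr_11577d
    generalize Word.ofBV (BitVec.signExtend 64 (Word.part Width.w32 (UInt64.ofNat j))) = J at *
    have hun : ShadowUntouched v.mem s_115756.mem := by v_untouched
    exact (live_p g A).accSmall hsh hun _ 2 (by decide) (by u_omega) (by u_omega)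
  · -- the store misses the text
    have hJ := f6_sext_ofNat j (by omega)
    have hlt : j < V := lt_of_hbr j V (by omega) (by omega) hbr_11577d
    generalize Word.ofBV (BitVec.signExtend 64 (Word.part Width.w32 (UInt64.ofNat j))) = J at *
    u_omega
  · exact absurd (hbr_of_lt j V (by omega) (by omega) hjltV) hbr_11577d
  · exact absurd (hbr_of_lt j V (by omega) (by omega) hjltV) hbr_11577d
  · -- the back edge 0x115764 → 0x115768
    have hJ := f6_sext_ofNat j (by omega)
    have hlt : j < V := lt_of_hbr j V (by omega) (by omega) hbr_11577d
    generalize Word.ofBV (BitVec.signExtend 64 (Word.part Width.w32 (UInt64.ofNat j))) = J at *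
    have hs : Mem.SameExcept [⟨g.R - 408, g.R⟩, ⟨g.R + 0x120, g.R + 0x508⟩] v.mem s_115764.mem := by
      rw [w_mem]
      u_same
    have hw : ∀ w, w ∈ [(⟨g.R - 408, g.R⟩ : Span), ⟨g.R + 0x120, g.R + 0x508⟩] → OkSpan g (floorAt g v.mem i) w := by
      intro w hwm
      simp only [List.mem_cons, List.mem_nil_iff, or_false] at hwm
      rcases hwm with rfl | rfl
      · left
        simp only []
        omega
      · right
        left
        simp only []
        omega
    have hst' : St u₀ g Vorbis.L.start_decoder.loop23 i A5 A mc n s_115764 := by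
      refine hst.step w_rip w_rsp (w_kept.get .rbp rfl) (w_kept.get .rbx rfl) w_eq ?_ hs hw
      v_inv
    obtain ⟨eg', ev'⟩ := hst.step_eqs hs hw
    have e12 : s_115764.reg .r12 = UInt64.ofNat (j + 1) := by
      rw [w_r12]
      exact f6_inc32_ofNat j (by omega)
    refine ReachVia.done ⟨⟨j + 1, hst', e12, ?_, ?_⟩, ?_⟩
    · rw [eg', ev', hgi, hVi]
      omega
    · -- the `id`s of the records filled so far
      have hs2 : Mem.SameExcept [⟨g.R - 408, g.R⟩, ⟨g.R + 0x120 + 4 * j, g.R + 0x120 + 4 * j + 4⟩] v.mem s_115764.mem := by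
        rw [w_mem]
        u_same
      apply hfill.step
      · intro j' hj'
        simp only [vacc, pAt, voff]
        unfold Mem.u16
        have ea := toNat_addr (g.R + 288 + 4 * j' + 2) (by omega)
        apply hs2.readLE _ 2 (by omega)
        intro w hwm
        simp only [List.mem_cons, List.mem_nil_iff, or_false] at hwm
        rcases hwm with rfl | rfl
        · simp only []
          omega
        · simp only []
          omega
      · simp only [vacc, pAt, voff]
        unfold Mem.u16
        have ea : addr (g.R + 288 + 4 * j + 2) = v.reg Reg.rsp + J * 4 + 290 := by
          symm
          apply eq_addr
          u_omega
        rw [ea, w_mem, Mem.readLE_writeLE_same _ _ _ _ (by omega)]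
        have e16 : (Word.part Width.w16 (UInt64.ofNat j)).toNat = j := by
          unfold Word.part
          simp only [Width.bits, BitVec.toNat_setWidth, UInt64.toNat_toBitVec]
          rw [Code.toNat_ofNat_lt _ (by omega)]
          exact Nat.mod_eq_of_lt (by omega)
        rw [e16]
        exact Nat.mod_eq_of_lt (by omega)
    · rw [e12, Code.toNat_ofNat_lt _ (by omega), Code.toNat_ofNat_lt _ (by omega)]
      omega
  · exact absurd (hbr_of_lt j V (by omega) (by omega) hjltV) hbr_11577d

/-- **The tree's assertion `InF6` (Vorbis/Spec/StartDecoderF6.lean) gives the worker's `St`**: the same facts, regrouped. -/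
theorem St.of_inF6 {u₀ : State} {g : Ghost} {pc : Word} {i : Nat} {A5 : Arena} {A : Arena × List Obj} {mc : Int} {n : Nat}
    {v : State} (h : InF6 u₀ g i A5 A mc n pc v) : St u₀ g pc i A5 A mc n v := by
  have hf := h.loop.frame
  exact ⟨hf.entry, hf.rip, hf.rsp, h.loop.rbp, h.rbx, hf.code, hf.inv, hf.offText, hf.ext, hf.callers, h.loop.hand, hf.same,
    ⟨hf.shadowIdx, hf.saved_rbx, hf.saved_rbp, hf.saved_r12, hf.saved_r13, hf.saved_r14, hf.saved_r15, hf.saved_ra, hf.shadow,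
      hf.sh7, h.loop.mid, h.loop.cnt, h.loop.i_le, h.loop.floors, h.loop.lfl, h.cur⟩, h.n_le⟩

/-- **The worker's `St` gives the tree's assertion `InF6`.** -/
theorem St.inF6 {u₀ : State} {g : Ghost} {pc : Word} {i : Nat} {A5 : Arena} {A : Arena × List Obj} {mc : Int} {n : Nat}
    {v : State} (h : St u₀ g pc i A5 A mc n v) : InF6 u₀ g i A5 A mc n pc v :=
  ⟨h.floorLoop, h.rbx, h.part.cur, h.n_le⟩

end Vorbis.Spec.start_decoder_F6d
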